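-- pv_equiv track=rewrite | github.com/ayanami2003/MLKit-Py | src/data_lifecycle/feature_engineering/construction/interactions/basis_function_expansion.py | _generate_powers
-- ===== SOURCE A (Python) =====
-- from typing import Optional, List, Union
--
-- def _generate_powers(n_features: int, degree: int) -> List[List[int]]:
--     """Generate all power combinations for polynomial features."""
--     from itertools import combinations_with_replacement
--     powers = []
--     for d in range(1, degree + 1):
--         combos = list(combinations_with_replacement(range(n_features), d))
--         for combo in combos:
--             power = [0] * n_features
--             for i in combo:
--                 power[i] += 1
--             powers.append(power)
--     return powers
-- ===== SOURCE B (Python) =====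
-- def _generate_powers(n_features: int, degree: int):
--     """Generate all power combinations for polynomial features."""
--     powers = []
--
--     def rec(i, remaining, prefix):
--         if i >= n_features:
--             if remaining == 0:
--                 powers.append(prefix)
--             return
--         for p in range(remaining, -1, -1):
--             rec(i + 1, remaining - p, prefix + [p])
--
--     for d in range(1, degree + 1):
--         rec(0, d, [])
--     return powers
-- ===== Notes on version B (the rewrite author's own statement) =====
-- stated objective: alternative
-- what changed: Replaces itertools.combinations_with_replacement plus per-combo increment counting by a direct recursive enumeration of exponent vectors: rec(feature, remaining) assigns each power from remaining down to 0 and recurses, emitting a vector only when the budget is exactly used up.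
import Mathlib
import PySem

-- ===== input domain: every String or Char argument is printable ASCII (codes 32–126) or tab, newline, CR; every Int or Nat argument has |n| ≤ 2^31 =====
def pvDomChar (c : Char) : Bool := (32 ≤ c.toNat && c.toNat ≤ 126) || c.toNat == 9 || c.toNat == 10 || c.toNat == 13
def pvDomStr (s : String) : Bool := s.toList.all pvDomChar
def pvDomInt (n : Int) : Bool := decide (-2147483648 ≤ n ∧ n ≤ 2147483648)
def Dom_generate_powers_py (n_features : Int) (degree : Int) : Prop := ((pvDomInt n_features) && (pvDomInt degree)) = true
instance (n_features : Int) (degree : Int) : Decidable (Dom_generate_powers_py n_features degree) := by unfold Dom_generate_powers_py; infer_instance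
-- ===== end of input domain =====

-- B replaces A's itertools.combinations_with_replacement enumeration (plus per-combo increment
-- counting into a zero vector) by a direct recursive enumeration of the exponent vectors.

-- ===== PORT A =====
-- itertools.combinations_with_replacement(pool, d) in its lexicographic emission order
-- (the library call A makes, ported as a helper)
def pvCwr : List Int → Nat → List (List Int)
  | _, 0 => [[]]
  | [], _ + 1 => []
  | x :: rest, d + 1 =>
      ((pvCwr (x :: rest) d).map (fun c => x :: c)) ++ pvCwr rest (d + 1)
termination_by pool d => (d, pool.length)

-- power[i] += 1 : exact for 0 ≤ i < len(power), which always holds here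
-- (combo elements come from range(n_features) and len(power) = n_features)
def pvIncr (power : List Int) (i : Int) : List Int :=
  power.set i.toNat (power.getD i.toNat 0 + 1)

def generate_powers_py (n_features : Int) (degree : Int) : List (List Int) :=
  (PySem.List.pyRange 1 (degree + 1)).foldl (fun powers d =>
    (pvCwr (PySem.List.pyRange 0 n_features) d.toNat).foldl
      (fun powers combo =>
        powers ++ [combo.foldl pvIncr (List.replicate n_features.toNat 0)])
      powers) []

-- ===== PORT B =====
-- rec(i, remaining, prefix): assign feature i a power from remaining down to 0 and recurse;
-- once all features are assigned, emit the prefix iff the budget is exactly used up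
def pvRec (n_features : Int) (i : Int) (remaining : Int) (pfx : List Int) : List (List Int) :=
  if _h : n_features ≤ i then
    if remaining = 0 then [pfx] else []
  else
    (PySem.List.pyRange remaining (-1) (-1)).foldl
      (fun out p => out ++ pvRec n_features (i + 1) (remaining - p) (pfx ++ [p])) []
termination_by (n_features - i).toNat
decreasing_by omega

def generate_powers_py_alt (n_features : Int) (degree : Int) : List (List Int) :=
  (PySem.List.pyRange 1 (degree + 1)).foldl
    (fun powers d => powers ++ pvRec n_features 0 d []) []

-- ===== PRECONDITION & SPEC =====
def Spec_generate_powers_py (n_features : Int) (degree : Int) (out : List (List Int)) : Prop := out = generate_powers_py_alt n_features degree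
instance (n_features : Int) (degree : Int) (out : List (List Int)) : Decidable (Spec_generate_powers_py n_features degree out) := by unfold Spec_generate_powers_py; infer_instance

-- ===== CLAIM (what is proved, stated in full; the proofs are below) =====
def Claim_equal_generate_powers_py : Prop := ∀ (n_features : Int) (degree : Int), Dom_generate_powers_py n_features degree → Spec_generate_powers_py n_features degree (generate_powers_py n_features degree)

-- ===== LEMMAS AND PROOFS =====

-- range(remaining, -1, -1) = [r, r-1, …, 0] for 0 ≤ r
theorem pvRange_down (r : Int) (hr : 0 ≤ r) :
    PySem.List.pyRange r (-1) (-1) = (List.range (r.toNat + 1)).map (fun k : Nat => r - (k : Int)) := by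
  simp only [PySem.List.pyRange]
  rw [if_neg (by norm_num : ¬((-1:Int) = 0)), if_neg (by norm_num : ¬((0:Int) < -1)),
      if_pos (by omega : (-1:Int) < r)]
  rw [show ((r - -1 + -(-1) - 1) / -(-1) : Int) = r + 1 by norm_num,
      show (r + 1).toNat = r.toNat + 1 by omega]
  apply List.map_congr_left
  intro k _
  ring

theorem mem_pvCwr {pool : List Int} {d : Nat} {c : List Int}
    (hc : c ∈ pvCwr pool d) : ∀ x ∈ c, x ∈ pool := by
  induction pool, d using pvCwr.induct generalizing c with
  | case1 pool => simp [pvCwr] at hc; simp [hc]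
  | case2 d => simp [pvCwr] at hc
  | case3 x rest d ih1 ih2 =>
      simp only [pvCwr, List.mem_append, List.mem_map] at hc
      rcases hc with ⟨c', hc', rfl⟩ | hc
      · intro y hy
        rcases List.mem_cons.mp hy with rfl | hy
        · simp
        · exact ih1 hc' y hy
      · intro y hy
        exact List.mem_cons_of_mem _ (ih2 hc y hy)

-- combos in pvCwr (a :: rest) D grouped by the multiplicity of the head element a:
-- first D copies of a, then D-1 copies, …, then none
theorem pvCwr_grouped (a : Int) (rest : List Int) (D : Nat) :
    pvCwr (a :: rest) D =
      (List.range (D + 1)).flatMap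
        (fun k => (pvCwr rest k).map (fun c => List.replicate (D - k) a ++ c)) := by
  induction D with
  | zero => simp [pvCwr]
  | succ D ih =>
      have hstep : pvCwr (a :: rest) (D + 1)
          = ((pvCwr (a :: rest) D).map (fun c => a :: c)) ++ pvCwr rest (D + 1) := by
        simp [pvCwr]
      rw [hstep, ih, List.map_flatMap]
      conv_rhs => rw [List.range_succ, List.flatMap_append]
      congr 1
      · apply List.flatMap_congr
        intro k hk
        rw [List.map_map]
        apply List.map_congr_left
        intro c _
        have hkD : k ≤ D := Nat.lt_succ_iff.mp (List.mem_range.mp hk)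
        simp only [Function.comp_apply]
        rw [show D + 1 - k = (D - k) + 1 by omega]
        simp [List.replicate_succ]
      · simp

-- A's increment loop over a combo computes the per-index occurrence counts
theorem pvFoldl_incr (c : List Int) : ∀ (v : List Int),
    (∀ x ∈ c, 0 ≤ x ∧ x.toNat < v.length) →
    c.foldl pvIncr v = (List.range v.length).map (fun j => v.getD j 0 + c.count (j : Int)) := by
  induction c with
  | nil =>
      intro v _
      simp only [List.foldl_nil, List.count_nil, Int.natCast_zero, add_zero]
      apply List.ext_getElem
      · simp
      · intro j h1 h2
        simp [List.getD_eq_getElem?_getD, List.getElem?_eq_getElem (by simpa using h2)]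
  | cons x c ih =>
      intro v hv
      have hx : 0 ≤ x ∧ x.toNat < v.length := hv x (by simp)
      have hlen : (pvIncr v x).length = v.length := by simp [pvIncr]
      rw [List.foldl_cons, ih (pvIncr v x) (fun y hy => by
        rw [hlen]; exact hv y (List.mem_cons_of_mem _ hy)), hlen]
      apply List.map_congr_left
      intro j hj
      have hjv : j < v.length := List.mem_range.mp hj
      have hget : (pvIncr v x).getD j 0
          = v.getD j 0 + (if x.toNat = j then 1 else 0) := by
        rcases eq_or_ne x.toNat j with rfl | hne
        · rw [List.getD_eq_getElem _ _ (show x.toNat < (pvIncr v x).length from by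
            rw [hlen]; exact hjv)]
          simp [pvIncr, hjv]
        · rw [List.getD_eq_getElem _ _ (show j < (pvIncr v x).length from by
            rw [hlen]; exact hjv), List.getD_eq_getElem _ _ hjv]
          simp [pvIncr, hne]
      rw [hget, List.count_cons]
      by_cases h : x.toNat = j
      · simp [h]
        rw [if_pos (show x = (j : Int) by omega)]
        ring
      · simp [h]
        omega

-- exponent suffix for features i, i+1, …, i+m-1, read off a combo by counting
def pvCountVec (i : Int) (m : Nat) (c : List Int) : List Int :=
  (List.range m).map (fun j : Nat => (c.count (i + (j : Int)) : Int))

theorem pvCountVec_cons (i : Int) (m : Nat) (X : List Int) :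
    pvCountVec i (m + 1) X = (X.count i : Int) :: pvCountVec (i + 1) m X := by
  simp only [pvCountVec, List.range_succ_eq_map, List.map_cons, List.map_map]
  congr 1
  · norm_num
  · apply List.map_congr_left
    intro j _
    simp only [Function.comp_apply]
    have h : i + ((Nat.succ j : Nat) : Int) = i + 1 + (j : Int) := by push_cast; ring
    rw [h]

-- the central invariant: B's recursion from feature i with budget r emits exactly the
-- count vectors of A's combos drawn from range(i, n), in the same order
theorem pvRec_eq (n : Int) (m : Nat) :
    ∀ (i r : Int) (pfx : List Int), i = n - m → 0 ≤ i → 0 ≤ r →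
    pvRec n i r pfx =
      (pvCwr (PySem.List.pyRange i n) r.toNat).map (fun c => pfx ++ pvCountVec i m c) := by
  induction m with
  | zero =>
      intro i r pfx him hi hr
      have hin : i = n := by omega
      have hrange : PySem.List.pyRange i n = [] := by
        simp [PySem.List.pyRange, hin]
      rw [pvRec, dif_pos (by omega : n ≤ i), hrange]
      rcases eq_or_ne r 0 with rfl | hr0
      · simp [pvCwr, pvCountVec]
      · rw [if_neg hr0, show r.toNat = (r.toNat - 1) + 1 by omega]
        simp [pvCwr]
  | succ m ih =>
      intro i r pfx him hi hr
      have hin : i < n := by omega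
      rw [pvRec, dif_neg (by omega : ¬ n ≤ i), pvRange_down r hr, List.foldl_map,
          PySem.List.foldl_append_eq_flatMap, List.nil_append,
          PySem.List.pyRange_one_cons hin, pvCwr_grouped, List.map_flatMap]
      apply List.flatMap_congr
      intro k hk
      have hkr : k ≤ r.toNat := by
        have := List.mem_range.mp hk; omega
      have h1 : r - (r - (k : Int)) = (k : Int) := by ring
      have h2 : ((k : Int)).toNat = k := by omega
      rw [h1, ih (i + 1) (k : Int) (pfx ++ [r - (k : Int)]) (by omega) (by omega) (by omega), h2]
      rw [List.map_map]
      apply List.map_congr_left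
      intro c hc
      have hcmem : ∀ x ∈ c, i + 1 ≤ x := by
        intro x hx
        have := PySem.List.mem_pyRange_one.mp (mem_pvCwr hc x hx)
        exact this.1
      simp only [Function.comp_apply]
      rw [pvCountVec_cons]
      have hrep : ((List.replicate (r.toNat - k) i ++ c).count i : Int) = r - (k : Int) := by
        rw [List.count_append, List.count_replicate]
        have : c.count i = 0 := by
          rw [List.count_eq_zero]
          intro hmem
          have := hcmem i hmem; omega
        simp [this]
        omega
      have htail : pvCountVec (i + 1) m (List.replicate (r.toNat - k) i ++ c)
          = pvCountVec (i + 1) m c := by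
        apply List.map_congr_left
        intro j _
        rw [List.count_append, List.count_replicate]
        simp
        intro h'
        omega
      rw [hrep, htail]
      simp

-- ===== VERDICT (by name: the statement is the Claim_ definition above) =====
theorem generate_powers_py_spec : Claim_equal_generate_powers_py := by
  intro n degree _
  unfold Spec_generate_powers_py generate_powers_py generate_powers_py_alt
  apply PySem.List.foldl_congr_mem
  intro powers d hd
  have hd1 : 1 ≤ d := (PySem.List.mem_pyRange_one.mp hd).1
  rw [PySem.List.foldl_append_singleton_eq_map]
  congr 1
  by_cases hn : n ≤ 0
  · have hrange : PySem.List.pyRange 0 n = [] := by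
      simp [PySem.List.pyRange, show ¬ ((0:Int) < n) by omega]
    rw [hrange, show d.toNat = (d.toNat - 1) + 1 by omega,
        pvRec, dif_pos hn, if_neg (by omega : ¬ d = 0)]
    simp [pvCwr]
  · rw [pvRec_eq n n.toNat 0 d [] (by omega) le_rfl (by omega)]
    apply List.map_congr_left
    intro c hc
    have hcr : ∀ x ∈ c, 0 ≤ x ∧ x.toNat < (List.replicate n.toNat (0:Int)).length := by
      intro x hx
      have := PySem.List.mem_pyRange_one.mp (mem_pvCwr hc x hx)
      constructor
      · exact this.1
      · rw [List.length_replicate]; omega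
    rw [pvFoldl_incr c _ hcr, List.nil_append, List.length_replicate]
    apply List.map_congr_left
    intro j hj
    have hjn : j < n.toNat := List.mem_range.mp hj
    rw [List.getD_eq_getElem _ _ (by simpa using hjn)]
    simp
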